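-- pv_equiv track=rewrite | github.com/rafaltrojniak/AdventOfCode | 2023/11/part1.py | expand_empty_space
-- ===== SOURCE A (Python) =====
-- def expand_empty_space(galaxies: list) -> list:
--     xes = [g[0] for g in galaxies]
--     yes = [g[1] for g in galaxies]
--     empty_x = [x for x in range(0, max(xes)) if x not in xes]
--     empty_y = [y for y in range(0, max(yes)) if y not in yes]
--
--     new_galaxies = []
--     for galaxy in galaxies:
--         add_x = sum(map(lambda x: x < galaxy[0], empty_x))
--         add_y = sum(map(lambda y: y < galaxy[1], empty_y))
--         new_galaxies.append(
--             (
--                 galaxy[0] + add_x,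
--                 galaxy[1] + add_y,
--             )
--         )
--     return new_galaxies
-- ===== SOURCE B (Python) =====
-- def _shifts(coords):
--     """Map each coordinate in [0, max] that is occupied to the number of
--     empty (unoccupied) values strictly below it, via one linear scan."""
--     shifts = {}
--     empties = 0
--     for c in range(max(coords) + 1):
--         if c in coords:
--             shifts[c] = empties
--         else:
--             empties += 1
--     return shifts
--
--
-- def expand_empty_space(galaxies: list) -> list:
--     xs = {g[0] for g in galaxies}
--     ys = {g[1] for g in galaxies}
--     shift_x = _shifts(xs)
--     shift_y = _shifts(ys)
--     return [
--         (g[0] + shift_x.get(g[0], 0), g[1] + shift_y.get(g[1], 0))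
--         for g in galaxies
--     ]
-- ===== Notes on version B (the rewrite author's own statement) =====
-- stated objective: faster
-- what changed: Instead of re-scanning the list of empty rows/columns for every galaxy (and scanning the coordinate list for every range value), B makes one linear scan over the coordinate range with a set and a running empties counter, building a shift dictionary that each galaxy then looks up once.
import Mathlib
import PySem

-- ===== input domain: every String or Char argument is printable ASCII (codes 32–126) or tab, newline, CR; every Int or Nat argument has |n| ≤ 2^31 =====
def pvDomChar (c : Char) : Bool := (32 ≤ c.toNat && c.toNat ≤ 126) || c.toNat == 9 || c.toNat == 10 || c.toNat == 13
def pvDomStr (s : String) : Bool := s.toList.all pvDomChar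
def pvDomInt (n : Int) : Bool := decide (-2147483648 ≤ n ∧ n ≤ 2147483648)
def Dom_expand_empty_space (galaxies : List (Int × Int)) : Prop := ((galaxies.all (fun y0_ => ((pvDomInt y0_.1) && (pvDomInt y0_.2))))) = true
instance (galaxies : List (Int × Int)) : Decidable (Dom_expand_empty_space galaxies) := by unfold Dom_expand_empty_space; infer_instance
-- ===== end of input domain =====

-- B replaces A's per-galaxy scan of the empty-row/column lists by one linear scan building a
-- shift dictionary looked up once per galaxy (faster in a timing run's mechanism: O(max+n) vs O(max*n)).

-- ===== PORT A =====
def expand_empty_space (galaxies : List (Int × Int)) : List (Int × Int) :=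
  let xes := galaxies.map (fun g => g.1)
  let yes := galaxies.map (fun g => g.2)
  let empty_x := (PySem.List.pyRange 0 ((PySem.List.max? xes (fun x => x)).getD 0) 1).filter
      (fun x => !(xes.contains x))
  let empty_y := (PySem.List.pyRange 0 ((PySem.List.max? yes (fun y => y)).getD 0) 1).filter
      (fun y => !(yes.contains y))
  galaxies.foldl (fun new_galaxies galaxy =>
    let add_x := (empty_x.map (fun x => if x < galaxy.1 then (1 : Int) else 0)).sum
    let add_y := (empty_y.map (fun y => if y < galaxy.2 then (1 : Int) else 0)).sum
    new_galaxies ++ [(galaxy.1 + add_x, galaxy.2 + add_y)]) []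

-- ===== PORT B =====
-- one linear scan over range(max+1): occupied coordinate ↦ number of empties strictly below it
def pvShifts (coords : PySem.Set Int) : PySem.Dict Int Int :=
  ((PySem.List.pyRange 0 ((PySem.List.max? coords (fun x => x)).getD 0 + 1) 1).foldl
    (fun (st : PySem.Dict Int Int × Int) c =>
      if coords.contains c then (st.1.insert c st.2, st.2) else (st.1, st.2 + 1))
    (PySem.Dict.empty, 0)).1

def expand_empty_space_alt (galaxies : List (Int × Int)) : List (Int × Int) :=
  let xs : PySem.Set Int := PySem.Set.ofList (galaxies.map (fun g => g.1))
  let ys : PySem.Set Int := PySem.Set.ofList (galaxies.map (fun g => g.2))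
  let shift_x := pvShifts xs
  let shift_y := pvShifts ys
  galaxies.map (fun g => (g.1 + shift_x.getD g.1 0, g.2 + shift_y.getD g.2 0))

-- ===== PRECONDITION & SPEC =====
-- Pre_ excludes only the empty list, on which A raises ValueError (max of an empty sequence).
def Pre_expand_empty_space (galaxies : List (Int × Int)) : Prop := galaxies ≠ []
instance (galaxies : List (Int × Int)) : Decidable (Pre_expand_empty_space galaxies) := by
  unfold Pre_expand_empty_space; infer_instance

def pvWitness_expand_empty_space : (List (Int × Int)) := [(0, 2), (3, 0)]

def Spec_expand_empty_space (galaxies : List (Int × Int)) (out : List (Int × Int)) : Prop :=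
  out = expand_empty_space_alt galaxies
instance (galaxies : List (Int × Int)) (out : List (Int × Int)) :
    Decidable (Spec_expand_empty_space galaxies out) := by unfold Spec_expand_empty_space; infer_instance

-- ===== CLAIM (what is proved, stated in full; the proofs are below) =====
def Claim_equal_expand_empty_space : Prop := ∀ (galaxies : List (Int × Int)),
  Dom_expand_empty_space galaxies → Pre_expand_empty_space galaxies →
  Spec_expand_empty_space galaxies (expand_empty_space galaxies)

-- ===== LEMMAS AND PROOFS =====

lemma max?_set_eq (l : List Int) :
    PySem.List.max? (PySem.Set.ofList l) (fun x => x) = PySem.List.max? l (fun x => x) := by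
  rcases hs : PySem.List.max? (PySem.Set.ofList l) (fun x => x) with _ | m1
  · rcases hl : PySem.List.max? l (fun x => x) with _ | m2
    · rfl
    · exfalso
      rw [PySem.List.max?_eq_none_iff] at hs
      have := (PySem.Set.mem_ofList l m2).2 (PySem.List.max?_mem hl)
      simp [hs] at this
  · rcases hl : PySem.List.max? l (fun x => x) with _ | m2
    · exfalso
      rw [PySem.List.max?_eq_none_iff] at hl
      have := PySem.List.max?_mem hs
      simp [hl] at this
    · have h1 := PySem.List.max?_isMax hs
      have h2 := PySem.List.max?_isMax hl
      have m1m : m1 ∈ l := (PySem.Set.mem_ofList l m1).1 (PySem.List.max?_mem hs)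
      have m2m : m2 ∈ PySem.Set.ofList l := (PySem.Set.mem_ofList l m2).2 (PySem.List.max?_mem hl)
      exact congrArg some (le_antisymm (h2 _ m1m) (h1 _ m2m))

lemma contains_set_eq (l : List Int) (c : Int) :
    (PySem.Set.ofList l : List Int).contains c = l.contains c := by
  simp [PySem.Set.mem_ofList]

lemma shifts_fold_inv (coords : List Int) (n : Nat) :
    ((PySem.List.pyRange 0 (n : Int) 1).foldl
      (fun (st : PySem.Dict Int Int × Int) c =>
        if coords.contains c then (st.1.insert c st.2, st.2) else (st.1, st.2 + 1))
      (PySem.Dict.empty, 0)).2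
      = (((PySem.List.pyRange 0 (n : Int) 1).countP (fun x => !(coords.contains x)) : Int))
  ∧ ∀ c : Int,
    (((PySem.List.pyRange 0 (n : Int) 1).foldl
      (fun (st : PySem.Dict Int Int × Int) c =>
        if coords.contains c then (st.1.insert c st.2, st.2) else (st.1, st.2 + 1))
      (PySem.Dict.empty, 0)).1).getD c 0
      = if coords.contains c = true ∧ 0 ≤ c ∧ c < (n : Int)
        then (((PySem.List.pyRange 0 c 1).countP (fun x => !(coords.contains x)) : Int))
        else 0 := by
  induction n with
  | zero =>
    rw [show ((0 : Nat) : Int) = 0 from rfl, PySem.List.pyRange_one_eq_nil le_rfl]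
    constructor
    · simp
    · intro c
      rw [if_neg (by omega)]
      simp [PySem.Dict.getD_empty]
  | succ n ih =>
    obtain ⟨ih1, ih2⟩ := ih
    have hsplit : PySem.List.pyRange 0 ((n + 1 : Nat) : Int) 1
        = PySem.List.pyRange 0 (n : Int) 1 ++ [(n : Int)] := by
      have h := PySem.List.pyRange_one_succ_right (a := 0) (b := (n : Int)) (by positivity)
      push_cast
      exact h
    rw [hsplit, List.foldl_append, List.countP_append]
    simp only [List.foldl_cons, List.foldl_nil]
    by_cases h : coords.contains (n : Int)
    · rw [if_pos h]
      have h' : (n : Int) ∈ coords := by simpa using h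
      constructor
      · rw [ih1]; simp [h']
      · intro c
        simp only
        rw [PySem.Dict.getD_insert]
        by_cases hc : c = (n : Int)
        · subst hc
          rw [if_pos rfl, if_pos ⟨h, by positivity, by push_cast; omega⟩, ih1]
        · rw [if_neg hc, ih2 c]
          by_cases hcond : coords.contains c = true ∧ 0 ≤ c ∧ c < (n : Int)
          · rw [if_pos hcond, if_pos ⟨hcond.1, hcond.2.1, by push_cast; omega⟩]
          · rw [if_neg hcond, if_neg (by push_cast at *; rintro ⟨h1, h2, h3⟩; exact hcond ⟨h1, h2, by omega⟩)]
    · rw [if_neg h]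
      have h' : (n : Int) ∉ coords := by simpa using h
      constructor
      · rw [ih1]; simp [h']
      · intro c
        simp only
        rw [ih2 c]
        by_cases hcond : coords.contains c = true ∧ 0 ≤ c ∧ c < (n : Int)
        · rw [if_pos hcond, if_pos ⟨hcond.1, hcond.2.1, by push_cast; omega⟩]
        · rw [if_neg hcond, if_neg ?_]
          rintro ⟨h1, h2, h3⟩
          apply hcond
          refine ⟨h1, h2, ?_⟩
          push_cast at h3
          rcases lt_or_eq_of_le (by omega : c ≤ (n : Int)) with h4 | h4
          · exact h4
          · exact (h (h4 ▸ h1)).elim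

lemma axis_agree (l : List Int) (g : Int) (hg : g ∈ l) :
    ((((PySem.List.pyRange 0 ((PySem.List.max? l (fun x => x)).getD 0) 1).filter
        (fun x => !(l.contains x))).map (fun x => if x < g then (1 : Int) else 0)).sum)
      = (pvShifts (PySem.Set.ofList l)).getD g 0 := by
  rcases hm : PySem.List.max? l (fun x => x) with _ | m
  · rw [PySem.List.max?_eq_none_iff] at hm; subst hm; cases hg
  have hgle : g ≤ m := PySem.List.max?_isMax hm g hg
  unfold pvShifts
  rw [max?_set_eq, hm]
  simp only [Option.getD_some, contains_set_eq]
  have hsum : ∀ (L : List Int),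
      (L.map (fun x => if x < g then (1 : Int) else 0)).sum
        = ((L.countP (fun x => decide (x < g)) : Int)) := by
    intro L
    have := PySem.List.sum_map_ite_one_zero (fun x => decide (x < g)) L
    simpa using this
  rw [hsum]
  by_cases hm0 : m < 0
  · rw [PySem.List.pyRange_one_eq_nil (by omega : (m : Int) ≤ 0),
        PySem.List.pyRange_one_eq_nil (by omega : m + 1 ≤ 0)]
    simp [PySem.Dict.getD_empty]
  · push Not at hm0
    have hn : ((m + 1).toNat : Int) = m + 1 := Int.toNat_of_nonneg (by omega)
    rw [show m + 1 = ((m + 1).toNat : Int) from hn.symm]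
    rw [(shifts_fold_inv l (m + 1).toNat).2 g]
    by_cases hg0 : 0 ≤ g
    · rw [if_pos ⟨by simpa using hg, hg0, by rw [hn]; omega⟩]
      rw [List.countP_filter,
          PySem.List.pyRange_one_append 0 g m hg0 hgle, List.countP_append]
      have h2 : List.countP (fun x => decide (x < g) && !l.contains x) (PySem.List.pyRange g m 1) = 0 := by
        rw [List.countP_eq_zero]
        intro x hx
        rw [PySem.List.mem_pyRange_one] at hx
        simp [not_lt.2 hx.1]
      have h1 : List.countP (fun x => decide (x < g) && !l.contains x) (PySem.List.pyRange 0 g 1)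
          = List.countP (fun x => !l.contains x) (PySem.List.pyRange 0 g 1) := by
        apply List.countP_congr
        intro x hx
        rw [PySem.List.mem_pyRange_one] at hx
        simp [hx.2]
      rw [h1, h2]
      push_cast; ring
    · rw [if_neg (by push Not at hg0; rintro ⟨_, h2, _⟩; omega)]
      have : List.countP (fun x => decide (x < g)) ((PySem.List.pyRange 0 m 1).filter (fun x => !(l.contains x))) = 0 := by
        rw [List.countP_eq_zero]
        intro x hx
        have hx' := List.mem_of_mem_filter hx
        rw [PySem.List.mem_pyRange_one] at hx'
        simp; omega
      rw [this]; rfl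

-- ===== VERDICT (by name: the statement is the Claim_ definition above) =====
theorem expand_empty_space_spec : Claim_equal_expand_empty_space := by
  intro galaxies _hdom _hpre
  unfold Spec_expand_empty_space expand_empty_space expand_empty_space_alt
  simp only
  rw [PySem.List.foldl_append_singleton_eq_map]
  simp only [List.nil_append]
  refine List.map_congr_left ?_
  intro g hg
  have hx := axis_agree (galaxies.map (fun g => g.1)) g.1 (List.mem_map_of_mem hg)
  have hy := axis_agree (galaxies.map (fun g => g.2)) g.2 (List.mem_map_of_mem hg)
  rw [hx, hy]
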